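-- pv_equiv track=rewrite | github.com/VeeraSJMJJ/Github-Demo | VowelCounter.py | highlight_vowels
-- ===== SOURCE A (Python) =====
-- def highlight_vowels(text):
--     vowels = "aeiouAEIOU"
--     highlighted = ""
--     for char in text:
--         if char in vowels:
--             highlighted += f"<span style='color: green; font-weight: bold;'>{char}</span>"
--         else:
--             highlighted += char
--     return highlighted
-- ===== SOURCE B (Python) =====
-- import re
--
-- def highlight_vowels(text):
--     return re.sub(
--         r"[aeiouAEIOU]",
--         lambda m: f"<span style='color: green; font-weight: bold;'>{m.group()}</span>",
--         text,
--     )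
-- ===== Notes on version B (the rewrite author's own statement) =====
-- stated objective: idiomatic
-- what changed: Replaces the explicit accumulator loop with per-character if/else by a single re.sub call over the vowel character class with a replacement function.
import Mathlib
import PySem

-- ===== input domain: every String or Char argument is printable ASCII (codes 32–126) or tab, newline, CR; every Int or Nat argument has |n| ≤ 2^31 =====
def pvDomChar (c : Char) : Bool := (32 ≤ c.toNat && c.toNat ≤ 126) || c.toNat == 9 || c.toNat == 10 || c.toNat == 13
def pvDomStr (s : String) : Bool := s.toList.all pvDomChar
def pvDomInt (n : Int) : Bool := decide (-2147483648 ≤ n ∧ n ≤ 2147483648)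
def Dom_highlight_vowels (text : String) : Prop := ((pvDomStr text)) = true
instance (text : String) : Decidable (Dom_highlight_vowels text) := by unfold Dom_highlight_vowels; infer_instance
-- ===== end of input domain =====

-- B replaces A's accumulator loop with a single regex substitution over the vowel class (idiomatic).

-- ===== PORT A =====
-- A: accumulate into 'highlighted', appending the wrapped span or the bare character.
def highlight_vowels (text : String) : String :=
  text.toList.foldl
    (fun highlighted char =>
      if char ∈ "aeiouAEIOU".toList then
        highlighted ++ "<span style='color: green; font-weight: bold;'>" ++ String.singleton char ++ "</span>"
      else
        highlighted ++ String.singleton char)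
    ""

-- ===== PORT B =====
-- B: re.sub over the single-character class [aeiouAEIOU] with a replacement function is, exactly,
-- the join of a per-character substitution map; ported as such.
def pvSubRepl (c : Char) : String :=
  if c ∈ "aeiouAEIOU".toList then
    "<span style='color: green; font-weight: bold;'>" ++ String.singleton c ++ "</span>"
  else
    String.singleton c

def highlight_vowels_alt (text : String) : String :=
  String.join (text.toList.map pvSubRepl)

-- ===== PRECONDITION & SPEC =====
def Spec_highlight_vowels (text : String) (out : String) : Prop := out = highlight_vowels_alt text
instance (text : String) (out : String) : Decidable (Spec_highlight_vowels text out) := by unfold Spec_highlight_vowels; infer_instance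

-- ===== CLAIM (what is proved, stated in full; the proofs are below) =====
def Claim_equal_highlight_vowels : Prop := ∀ (text : String), Dom_highlight_vowels text → Spec_highlight_vowels text (highlight_vowels text)

-- ===== LEMMAS AND PROOFS =====
theorem pv_join_cons (s : String) (l : List String) : String.join (s :: l) = s ++ String.join l := by
  simp [String.join]
  induction l generalizing s with
  | nil => simp
  | cons t ts ih =>
    simp only [List.foldl_cons, String.empty_append]
    rw [ih (s ++ t), ih t, String.append_assoc]

theorem pv_foldl_join (l : List Char) (acc : String) :
    l.foldl
      (fun highlighted char =>
        if char ∈ "aeiouAEIOU".toList then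
          highlighted ++ "<span style='color: green; font-weight: bold;'>" ++ String.singleton char ++ "</span>"
        else
          highlighted ++ String.singleton char)
      acc = acc ++ String.join (l.map pvSubRepl) := by
  induction l generalizing acc with
  | nil => simp [String.join]
  | cons c cs ih =>
    simp only [List.foldl_cons, List.map_cons, pv_join_cons]
    by_cases h : c ∈ "aeiouAEIOU".toList
    · rw [if_pos h, ih]
      simp only [pvSubRepl, h, if_true, String.append_assoc]
    · rw [if_neg h, ih]
      simp only [pvSubRepl, h, if_false, String.append_assoc]

-- ===== VERDICT (by name: the statement is the Claim_ definition above) =====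
theorem highlight_vowels_spec : Claim_equal_highlight_vowels := by
  intro text _
  unfold Spec_highlight_vowels highlight_vowels highlight_vowels_alt
  rw [pv_foldl_join]
  simp
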